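-- pv_equiv track=rewrite | github.com/longmatys/Advent-of-Code-2023 | day 13.py | zpracuj_obrazek_lines
-- ===== SOURCE A (Python) =====
-- def najdi_zrcadlo(line):
--     return_set = set()
--     for i in range(1,int(len(line))):
--         part_r = line[i:2*i]
--         part_r.reverse()
--         if line[0:i] == part_r:
--             return_set.add(i)
--         part_r = line[len(line)-2*i:len(line)-i]
--         part_r.reverse()
--         if line[len(line)-i:] == part_r:
--             return_set.add(len(line)-i)
--
--     return return_set
--
-- def zpracuj_obrazek_lines(image):
--     best_kandidat = None
--     for line in image:
--         kandidati = najdi_zrcadlo(list(line))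
--         if best_kandidat == None:
--             best_kandidat = kandidati
--         else:
--             best_kandidat = best_kandidat.intersection(kandidati)
--     return best_kandidat
-- ===== SOURCE B (Python) =====
-- def zpracuj_obrazek_lines(image):
--     if not image:
--         return None
--
--     def mirror_at(row, j):
--         n = len(row)
--         if j < 1 or j > n - 1:
--             return False
--         k = min(j, n - j)
--         return row[j - k:j] == row[j:j + k][::-1]
--
--     return {j for j in range(1, len(image[0]))
--             if all(mirror_at(row, j) for row in image)}
-- ===== Notes on version B (the rewrite author's own statement) =====
-- stated objective: faster
-- what changed: A computes for every row a full set of edge-anchored mirror positions (two slice-reverse tests per index per row) and intersects the per-row sets; B scans axis-major: for each axis of the first row it does one symmetric min-side reflection check and keeps the axis iff it holds in every row, so no sets are built, no intersection is taken, and a failing row stops the per-axis scan early.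
import Mathlib
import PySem

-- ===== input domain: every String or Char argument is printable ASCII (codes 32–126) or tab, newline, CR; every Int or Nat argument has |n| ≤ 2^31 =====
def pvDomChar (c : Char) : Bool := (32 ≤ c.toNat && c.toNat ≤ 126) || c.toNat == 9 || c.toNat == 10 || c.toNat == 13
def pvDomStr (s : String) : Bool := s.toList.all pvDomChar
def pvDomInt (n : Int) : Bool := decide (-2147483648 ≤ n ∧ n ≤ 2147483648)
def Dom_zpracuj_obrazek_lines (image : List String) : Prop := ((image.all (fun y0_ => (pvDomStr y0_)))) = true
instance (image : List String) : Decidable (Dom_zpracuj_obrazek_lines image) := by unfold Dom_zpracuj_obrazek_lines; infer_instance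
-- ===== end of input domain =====

-- B replaces A's per-row mirror-sets and set intersection by an axis-major scan: one symmetric
-- min-side reflection check per axis, kept only if it holds in every row (objective: alternative).
-- Both programs return a Python set (unordered); both ports represent it in ascending order.

-- ===== PORT A =====
-- the condition of A's first 'if' (line[0:i] == reversed(line[i:2i]))
def condL (line : List Char) (i : Int) : Bool :=
  PySem.List.slice line (some 0) (some i) == (PySem.List.slice line (some i) (some (2*i))).reverse

-- the condition of A's second 'if' (line[len-i:] == reversed(line[len-2i:len-i]))
def condR (line : List Char) (i : Int) : Bool :=
  PySem.List.slice line (some ((line.length : Int) - i)) none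
    == (PySem.List.slice line (some ((line.length : Int) - 2*i)) (some ((line.length : Int) - i))).reverse

-- A's loop body: add i / len-i to the set when the slice comparisons succeed
def krok (line : List Char) (s : PySem.Set Int) (i : Int) : PySem.Set Int :=
  let s1 := if condL line i then PySem.Set.add s i else s
  if condR line i then PySem.Set.add s1 ((line.length : Int) - i) else s1

def najdi_zrcadlo (line : List Char) : PySem.Set Int :=
  (PySem.List.pyRange 1 (line.length : Int)).foldl (krok line) PySem.Set.empty

-- A's loop body over the image: first line's set, then intersections
def projdi (best : Option (PySem.Set Int)) (line : String) : Option (PySem.Set Int) :=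
  let kandidati := najdi_zrcadlo line.toList
  match best with
  | none => some kandidati
  | some b => some (PySem.Set.inter b kandidati)

def zpracuj_obrazek_lines (image : List String) : Option (List Int) :=
  -- Python's iteration order over the returned set is hash order (not modelled);
  -- the set is represented canonically in ascending order
  (image.foldl projdi none).map (fun s => PySem.List.sorted s (fun x => x) false)

-- ===== PORT B =====
def mirrorAt (row : List Char) (j : Int) : Bool :=
  let n : Int := row.length
  if j < 1 ∨ j > n - 1 then false
  else
    PySem.List.slice row (some (j - min j (n - j))) (some j)
      == (PySem.List.slice row (some j) (some (j + min j (n - j)))).reverse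

def zpracuj_obrazek_lines_alt (image : List String) : Option (List Int) :=
  match image with
  | [] => none
  | first :: _ =>
      -- set comprehension over an increasing range: its distinct elements, ascending
      some ((PySem.List.pyRange 1 (first.toList.length : Int)).filter
        (fun j => image.all (fun row => mirrorAt row.toList j)))

-- ===== PRECONDITION & SPEC =====
def Spec_zpracuj_obrazek_lines (image : List String) (out : Option (List Int)) : Prop := out = zpracuj_obrazek_lines_alt image
instance (image : List String) (out : Option (List Int)) : Decidable (Spec_zpracuj_obrazek_lines image out) := by unfold Spec_zpracuj_obrazek_lines; infer_instance

-- ===== CLAIM (what is proved, stated in full; the proofs are below) =====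
def Claim_equal_zpracuj_obrazek_lines : Prop := ∀ (image : List String), Dom_zpracuj_obrazek_lines image → Spec_zpracuj_obrazek_lines image (zpracuj_obrazek_lines image)

-- ===== LEMMAS AND PROOFS =====

lemma mirrorAt_bounds {row : List Char} {j : Int} (h : mirrorAt row j = true) :
    1 ≤ j ∧ j ≤ (row.length : Int) - 1 := by
  by_contra hc
  unfold mirrorAt at h
  rw [if_pos (by omega)] at h
  exact absurd h (by simp)

lemma condL_eq_mirror (line : List Char) (x : Int) (h1 : 1 ≤ x) (h2 : 2*x ≤ (line.length : Int)) :
    condL line x = mirrorAt line x := by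
  unfold condL mirrorAt
  rw [if_neg (by omega : ¬(x < 1 ∨ x > (line.length : Int) - 1))]
  have hk : min x ((line.length : Int) - x) = x := by omega
  rw [hk]
  have e1 : x - x = 0 := by ring
  have e2 : x + x = 2*x := by ring
  rw [e1, e2]

lemma condR_eq_mirror (line : List Char) (x : Int) (h1 : 1 ≤ x) (hx : x ≤ (line.length : Int) - 1)
    (h2 : (line.length : Int) ≤ 2*x) :
    condR line ((line.length : Int) - x) = mirrorAt line x := by
  unfold condR mirrorAt
  rw [if_neg (by omega : ¬(x < 1 ∨ x > (line.length : Int) - 1))]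
  have hk : min x ((line.length : Int) - x) = (line.length : Int) - x := by omega
  rw [hk]
  have e1 : (line.length : Int) - ((line.length : Int) - x) = x := by ring
  have e2 : (line.length : Int) - 2*((line.length : Int) - x) = 2*x - (line.length : Int) := by ring
  have e3 : x - ((line.length : Int) - x) = 2*x - (line.length : Int) := by ring
  have e4 : x + ((line.length : Int) - x) = (line.length : Int) := by ring
  rw [e1, e2, e3, e4]
  have hfrom : PySem.List.slice line (some x) none = line.drop x.toNat :=
    PySem.List.slice_from line (by omega)
  have hto : PySem.List.slice line (some x) (some (line.length : Int)) = line.drop x.toNat := by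
    rw [PySem.List.slice_toNat line (by omega) (by omega)]
    exact List.take_of_length_le (by simp)
  rw [hfrom, hto]
  rw [Bool.eq_iff_iff]
  simp only [beq_iff_eq]
  constructor
  · intro h; rw [h]; simp
  · intro h; rw [h]; simp

lemma condL_false (line : List Char) (x : Int) (h1 : 1 ≤ x) (h2 : x < (line.length : Int))
    (h3 : (line.length : Int) < 2*x) : condL line x = false := by
  rw [Bool.eq_false_iff]
  intro h
  unfold condL at h
  rw [beq_iff_eq] at h
  have hl := congrArg List.length h
  rw [PySem.List.slice_zero_start, PySem.List.slice_to line (by omega),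
      PySem.List.slice_toNat line (by omega) (by omega)] at hl
  simp only [List.length_take, List.length_drop, List.length_reverse] at hl
  omega

lemma condR_false (line : List Char) (i : Int) (h1 : 1 ≤ i) (h2 : i < (line.length : Int))
    (h3 : (line.length : Int) < 2*i) : condR line i = false := by
  rw [Bool.eq_false_iff]
  intro h
  unfold condR at h
  rw [beq_iff_eq] at h
  have hl := congrArg List.length h
  rw [PySem.List.slice_from line (by omega)] at hl
  rw [List.length_reverse, PySem.List.length_slice] at hl
  simp only [PySem.List.clampIdx] at hl
  simp only [List.length_drop] at hl
  split_ifs at hl <;> omega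

lemma mem_krok (line : List Char) (s : PySem.Set Int) (i x : Int) :
    x ∈ krok line s i ↔ x ∈ s ∨ (condL line i = true ∧ x = i) ∨
      (condR line i = true ∧ x = (line.length : Int) - i) := by
  unfold krok
  split_ifs with hL hR hR <;> (simp [PySem.Set.mem_add, hL, hR]; try tauto)

lemma mem_foldl_krok (line : List Char) (l : List Int) (s : PySem.Set Int) (x : Int) :
    x ∈ l.foldl (krok line) s ↔ x ∈ s ∨ ∃ i ∈ l, (condL line i = true ∧ x = i) ∨
      (condR line i = true ∧ x = (line.length : Int) - i) := by
  induction l generalizing s with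
  | nil => simp
  | cons a t ih =>
      rw [List.foldl_cons, ih, mem_krok]
      simp only [List.mem_cons]
      constructor
      · rintro ((h | h | h) | ⟨i, hi, h⟩)
        · exact Or.inl h
        · exact Or.inr ⟨a, Or.inl rfl, Or.inl h⟩
        · exact Or.inr ⟨a, Or.inl rfl, Or.inr h⟩
        · exact Or.inr ⟨i, Or.inr hi, h⟩
      · rintro (h | ⟨i, (rfl | hi), h⟩)
        · exact Or.inl (Or.inl h)
        · exact Or.inl (Or.inr h)
        · exact Or.inr ⟨i, hi, h⟩

lemma nodup_foldl_krok (line : List Char) (l : List Int) (s : PySem.Set Int) (hs : s.Nodup) :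
    (l.foldl (krok line) s).Nodup := by
  induction l generalizing s with
  | nil => exact hs
  | cons a t ih =>
      rw [List.foldl_cons]
      apply ih
      unfold krok
      split_ifs <;> first
        | exact PySem.Set.nodup_add _ _ (PySem.Set.nodup_add _ _ hs)
        | exact PySem.Set.nodup_add _ _ hs
        | exact hs

lemma nodup_najdi (line : List Char) : (najdi_zrcadlo line).Nodup :=
  nodup_foldl_krok line _ _ List.nodup_nil

lemma mem_najdi (line : List Char) (x : Int) :
    x ∈ najdi_zrcadlo line ↔ mirrorAt line x = true := by
  unfold najdi_zrcadlo
  rw [mem_foldl_krok]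
  simp only [PySem.Set.empty, List.not_mem_nil, false_or, PySem.List.mem_pyRange_one]
  constructor
  · rintro ⟨i, ⟨hi1, hi2⟩, (⟨hc, hxe⟩ | ⟨hc, hxe⟩)⟩
    · rw [hxe]
      by_cases h : 2*i ≤ (line.length : Int)
      · rw [← condL_eq_mirror line i hi1 h]; exact hc
      · rw [condL_false line i hi1 hi2 (by omega)] at hc; exact absurd hc (by simp)
    · rw [hxe]
      by_cases h : 2*i ≤ (line.length : Int)
      · rw [← condR_eq_mirror line ((line.length : Int) - i) (by omega) (by omega) (by omega)]
        have : (line.length : Int) - ((line.length : Int) - i) = i := by ring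
        rw [this]; exact hc
      · rw [condR_false line i hi1 hi2 (by omega)] at hc; exact absurd hc (by simp)
  · intro hm
    obtain ⟨hb1, hb2⟩ := mirrorAt_bounds hm
    by_cases h : 2*x ≤ (line.length : Int)
    · exact ⟨x, ⟨hb1, by omega⟩, Or.inl ⟨by rw [condL_eq_mirror line x hb1 h]; exact hm, rfl⟩⟩
    · refine ⟨(line.length : Int) - x, ⟨by omega, by omega⟩, Or.inr ⟨?_, by ring⟩⟩
      rw [condR_eq_mirror line x hb1 hb2 (by omega)]; exact hm

lemma foldl_projdi_some (rest : List String) (s : PySem.Set Int) :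
    rest.foldl projdi (some s) =
      some (rest.foldl (fun b line => PySem.Set.inter b (najdi_zrcadlo line.toList)) s) := by
  induction rest generalizing s with
  | nil => rfl
  | cons a t ih => rw [List.foldl_cons, List.foldl_cons]; exact ih _

lemma mem_interfold (rest : List String) (s : PySem.Set Int) (x : Int) :
    x ∈ rest.foldl (fun b line => PySem.Set.inter b (najdi_zrcadlo line.toList)) s ↔
      x ∈ s ∧ ∀ r ∈ rest, x ∈ najdi_zrcadlo r.toList := by
  induction rest generalizing s with
  | nil => simp
  | cons a t ih =>
      rw [List.foldl_cons, ih, PySem.Set.mem_inter]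
      simp only [List.mem_cons]
      constructor
      · rintro ⟨⟨hs, ha⟩, ht⟩
        exact ⟨hs, fun r hr => by rcases hr with rfl | hr; exact ha; exact ht r hr⟩
      · rintro ⟨hs, hall⟩
        exact ⟨⟨hs, hall a (Or.inl rfl)⟩, fun r hr => hall r (Or.inr hr)⟩

lemma nodup_interfold (rest : List String) (s : PySem.Set Int) (hs : s.Nodup) :
    (rest.foldl (fun b line => PySem.Set.inter b (najdi_zrcadlo line.toList)) s).Nodup := by
  induction rest generalizing s with
  | nil => exact hs
  | cons a t ih => rw [List.foldl_cons]; exact ih _ (PySem.Set.nodup_inter _ _ hs)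

-- ===== VERDICT (by name: the statement is the Claim_ definition above) =====
theorem zpracuj_obrazek_lines_spec : Claim_equal_zpracuj_obrazek_lines := by
  intro image _
  unfold Spec_zpracuj_obrazek_lines
  cases image with
  | nil => rfl
  | cons first rest =>
      unfold zpracuj_obrazek_lines zpracuj_obrazek_lines_alt
      rw [List.foldl_cons]
      have h0 : projdi none first = some (najdi_zrcadlo first.toList) := rfl
      rw [h0, foldl_projdi_some, Option.map_some]
      congr 1
      apply PySem.List.sorted_eq_of_perm_of_pairwise_lt
      · rw [List.perm_ext_iff_of_nodup
          ((PySem.List.nodup_pyRange_one _ _).filter _)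
          (nodup_interfold rest _ (nodup_najdi _))]
        intro a
        rw [mem_interfold]
        simp only [List.mem_filter, PySem.List.mem_pyRange_one, List.all_cons, List.all_eq_true,
          Bool.and_eq_true, mem_najdi]
        constructor
        · rintro ⟨⟨ha1, ha2⟩, hf, hr⟩
          exact ⟨hf, fun r hr' => (hr r hr')⟩
        · rintro ⟨hf, hr⟩
          obtain ⟨hb1, hb2⟩ := mirrorAt_bounds hf
          exact ⟨⟨hb1, by omega⟩, hf, hr⟩
      · exact (PySem.List.pairwise_lt_pyRange_one _ _).filter _
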